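-- pv_equiv track=rewrite | github.com/XMXSY123/BiomedCLIP-Mammo | biomedclip_mammo/metadata_utils.py | _label_from_rows
-- ===== SOURCE A (Python) =====
-- from typing import Dict, List, Set, Tuple
--
-- D_EXCLUDE = {"ARCH", "ASYM"}
--
-- def _d_contains_excluded(d_val: str) -> bool:
--     """D 列是否包含 ARCH 或 ASYM（含组合如 ARCH+CALC）。"""
--     for part in d_val.split("+"):
--         if part.strip() in D_EXCLUDE:
--             return True
--     return False
--
-- def _all_d_norm(d_vals: Set[str]) -> bool:
--     """是否全部为 NORM。"""
--     expanded = set()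
--     for c in d_vals:
--         for part in c.split("+"):
--             expanded.add(part.strip())
--     return expanded <= {"NORM"} or expanded == set()
--
-- PROMPT_PREFIX = "Mammography showing "
--
-- def _label_from_rows(rows: List[Tuple[str, str]]) -> str:
--     """
--     根据 (D, E) 列表得到提示词句子：前缀 + Benign / Benign Mass / Malignant Mass，或 None 表示排除。
--     """
--     if not rows:
--         return None
--     # 排除：任一 D 含 ARCH/ASYM，或任一 E 为 N
--     for d_val, e_val in rows:
--         if _d_contains_excluded(d_val):
--             return None
--         if e_val == "N":
--             return None
--     d_vals = {r[0] for r in rows}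
--     e_vals = {r[1] for r in rows}
--     if _all_d_norm(d_vals):
--         return PROMPT_PREFIX + "healthy breast"
--     if "M" in e_vals:
--         return PROMPT_PREFIX + "breast with malignant mass"
--     if "B" in e_vals:
--         return PROMPT_PREFIX + "breast with benign mass"
--     return None
-- ===== SOURCE B (Python) =====
-- def _label_from_rows(rows):
--     """Single pass: accumulate all_norm/has_M/has_B flags instead of building sets."""
--     if not rows:
--         return None
--     all_norm = True
--     has_M = False
--     has_B = False
--     for d_val, e_val in rows:
--         for part in d_val.split("+"):
--             p = part.strip()
--             if p == "ARCH" or p == "ASYM":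
--                 return None
--             if p != "NORM":
--                 all_norm = False
--         if e_val == "N":
--             return None
--         has_M = has_M or e_val == "M"
--         has_B = has_B or e_val == "B"
--     if all_norm:
--         return "Mammography showing healthy breast"
--     if has_M:
--         return "Mammography showing breast with malignant mass"
--     if has_B:
--         return "Mammography showing breast with benign mass"
--     return None
-- ===== Notes on version B (the rewrite author's own statement) =====
-- stated objective: simpler
-- what changed: Replaces the two-phase structure (exclusion scan, then set comprehensions plus a helper that expands a set of D values into another set and subset-tests it) with one loop that accumulates three booleans (all_norm, has_M, has_B) while scanning parts, deciding the label from the flags afterwards.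
import Mathlib
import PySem

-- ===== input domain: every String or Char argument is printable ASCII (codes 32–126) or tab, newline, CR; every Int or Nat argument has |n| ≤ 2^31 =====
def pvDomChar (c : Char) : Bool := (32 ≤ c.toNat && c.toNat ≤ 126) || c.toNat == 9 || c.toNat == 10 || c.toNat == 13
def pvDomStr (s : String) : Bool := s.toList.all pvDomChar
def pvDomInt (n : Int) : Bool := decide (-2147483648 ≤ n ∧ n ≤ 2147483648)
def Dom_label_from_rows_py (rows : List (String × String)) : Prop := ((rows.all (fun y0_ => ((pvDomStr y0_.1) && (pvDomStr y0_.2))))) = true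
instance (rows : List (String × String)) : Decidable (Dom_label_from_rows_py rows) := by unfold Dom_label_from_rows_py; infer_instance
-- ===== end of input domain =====

-- B replaces A's exclusion scan + set comprehensions + set-expansion subset test by a single
-- flag-accumulating pass (all_norm / has_M / has_B); objective: simpler.

-- ===== PORT A =====
-- d_val.split("+"): sep is the nonempty literal "+", so split? is always `some`
def pvSplitPlus (d : String) : List String := (PySem.Str.split? d "+").getD []

def pvD_EXCLUDE : PySem.Set String := PySem.Set.ofList ["ARCH", "ASYM"]

-- _d_contains_excluded: loop with early `return True` = List.any
def pvDContainsExcluded (d : String) : Bool :=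
  (pvSplitPlus d).any (fun part => pvD_EXCLUDE.contains (PySem.Str.strip part))

-- _all_d_norm: the expanded set is consumed only by order-insensitive subset/equality tests
def pvAllDNorm (d_vals : PySem.Set String) : Bool :=
  let expanded := d_vals.foldl
    (fun acc c => (pvSplitPlus c).foldl (fun a p => PySem.Set.add a (PySem.Str.strip p)) acc)
    PySem.Set.empty
  PySem.Set.issubset expanded (PySem.Set.ofList ["NORM"]) || PySem.Set.equal expanded PySem.Set.empty

-- the first loop of _label_from_rows (early `return None`s → Bool "excluded?")
def pvExcludeScan : List (String × String) → Bool
  | [] => false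
  | (d_val, e_val) :: rest =>
    if pvDContainsExcluded d_val then true
    else if e_val == "N" then true
    else pvExcludeScan rest

def label_from_rows_py (rows : List (String × String)) : Option String :=
  if rows.isEmpty then none
  else if pvExcludeScan rows then none
  else
    let d_vals := PySem.Set.ofList (rows.map (fun r => r.1))
    let e_vals := PySem.Set.ofList (rows.map (fun r => r.2))
    if pvAllDNorm d_vals then some "Mammography showing healthy breast"
    else if e_vals.contains "M" then some "Mammography showing breast with malignant mass"
    else if e_vals.contains "B" then some "Mammography showing breast with benign mass"
    else none

-- ===== PORT B =====
-- inner `for part in d_val.split("+")` loop of B: none = early `return None`, some an' = updated all_norm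
def pvPartsCheck : List String → Bool → Option Bool
  | [], an => some an
  | part :: ps, an =>
    let p := PySem.Str.strip part
    if p == "ARCH" || p == "ASYM" then none
    else pvPartsCheck ps (an && p == "NORM")

def pvLoopB : List (String × String) → Bool → Bool → Bool → Option String
  | [], all_norm, has_M, has_B =>
    if all_norm then some "Mammography showing healthy breast"
    else if has_M then some "Mammography showing breast with malignant mass"
    else if has_B then some "Mammography showing breast with benign mass"
    else none
  | (d_val, e_val) :: rest, all_norm, has_M, has_B =>
    match pvPartsCheck (pvSplitPlus d_val) all_norm with
    | none => none
    | some an' =>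
      if e_val == "N" then none
      else pvLoopB rest an' (has_M || e_val == "M") (has_B || e_val == "B")

def label_from_rows_py_alt (rows : List (String × String)) : Option String :=
  if rows.isEmpty then none
  else pvLoopB rows true false false

-- ===== PRECONDITION & SPEC =====
def Spec_label_from_rows_py (rows : List (String × String)) (out : Option String) : Prop := out = label_from_rows_py_alt rows
instance (rows : List (String × String)) (out : Option String) : Decidable (Spec_label_from_rows_py rows out) := by unfold Spec_label_from_rows_py; infer_instance

-- ===== CLAIM (what is proved, stated in full; the proofs are below) =====
def Claim_equal_label_from_rows_py : Prop := ∀ (rows : List (String × String)), Dom_label_from_rows_py rows → Spec_label_from_rows_py rows (label_from_rows_py rows)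

-- ===== LEMMAS AND PROOFS =====

-- row-level predicates used to characterise both programs
def pvRowExcl (d : String) : Bool :=
  (pvSplitPlus d).any (fun p => PySem.Str.strip p == "ARCH" || PySem.Str.strip p == "ASYM")

def pvRowNorm (d : String) : Bool :=
  (pvSplitPlus d).all (fun p => PySem.Str.strip p == "NORM")

lemma pvDContainsExcluded_eq (d : String) : pvDContainsExcluded d = pvRowExcl d := by
  unfold pvDContainsExcluded pvRowExcl pvD_EXCLUDE
  simp [PySem.Set.contains, PySem.Set.ofList, beq_eq_decide]

lemma pvPartsCheck_eq (ps : List String) (an : Bool) :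
    pvPartsCheck ps an =
      if ps.any (fun p => PySem.Str.strip p == "ARCH" || PySem.Str.strip p == "ASYM") then none
      else some (an && ps.all (fun p => PySem.Str.strip p == "NORM")) := by
  induction ps generalizing an with
  | nil => simp [pvPartsCheck]
  | cons p ps ih =>
    simp only [pvPartsCheck, ih, List.any_cons, List.all_cons]
    by_cases h : (PySem.Str.strip p == "ARCH" || PySem.Str.strip p == "ASYM") = true
    · simp [h]
    · simp [h, Bool.and_assoc]

-- B's loop characterised against A's exclusion scan and the row predicates
lemma pvLoopB_eq (rows : List (String × String)) (an hM hB : Bool) :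
    pvLoopB rows an hM hB =
      if pvExcludeScan rows then none
      else
        if an && rows.all (fun r => pvRowNorm r.1) then some "Mammography showing healthy breast"
        else if hM || rows.any (fun r => r.2 == "M") then some "Mammography showing breast with malignant mass"
        else if hB || rows.any (fun r => r.2 == "B") then some "Mammography showing breast with benign mass"
        else none := by
  induction rows generalizing an hM hB with
  | nil => simp [pvLoopB, pvExcludeScan]
  | cons r rows ih =>
    obtain ⟨d, e⟩ := r
    simp only [pvLoopB, pvExcludeScan, pvPartsCheck_eq, pvDContainsExcluded_eq]
    by_cases hx : pvRowExcl d = true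
    · simp only [List.any_eq_true, pvRowExcl, Bool.or_eq_true, beq_iff_eq] at hx
      simp [hx]
      intro h1 _ _
      exact absurd hx (by simpa [pvRowExcl] using h1)
    · have hxf : pvRowExcl d = false := Bool.eq_false_iff.mpr hx
      have hx' : ((pvSplitPlus d).any fun p => PySem.Str.strip p == "ARCH" || PySem.Str.strip p == "ASYM") = false := by
        simpa [pvRowExcl] using hxf
      by_cases he : (e == "N") = true
      · simp [hx', he]
      · have hef : (e == "N") = false := Bool.eq_false_iff.mpr he
        simp only [hx', Bool.false_eq_true, if_false, hef, ih]
        rw [Bool.and_assoc, Bool.or_assoc, Bool.or_assoc]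
        simp [hxf, pvRowNorm]
        rfl

-- membership in the inner part-expansion fold
lemma pvInnerMem (ps : List String) (acc : PySem.Set String) (x : String) :
    x ∈ ps.foldl (fun a p => PySem.Set.add a (PySem.Str.strip p)) acc
      ↔ x ∈ acc ∨ ∃ p ∈ ps, PySem.Str.strip p = x := by
  induction ps generalizing acc with
  | nil => simp
  | cons p ps ih =>
    simp only [List.foldl_cons, ih, PySem.Set.mem_add, List.mem_cons]
    constructor
    · rintro (⟨h | h⟩ | ⟨q, hq, he⟩)
      · exact Or.inl h
      · exact Or.inr ⟨p, Or.inl rfl, h.symm⟩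
      · exact Or.inr ⟨q, Or.inr hq, he⟩
    · rintro (h | ⟨q, (rfl | hq), he⟩)
      · exact Or.inl (Or.inl h)
      · exact Or.inl (Or.inr he.symm)
      · exact Or.inr ⟨q, hq, he⟩

-- membership in A's expanded set
lemma pvMem_expand (ds : List String) (acc : PySem.Set String) (x : String) :
    x ∈ ds.foldl (fun acc c => (pvSplitPlus c).foldl (fun a p => PySem.Set.add a (PySem.Str.strip p)) acc) acc
      ↔ x ∈ acc ∨ ∃ d ∈ ds, ∃ p ∈ pvSplitPlus d, PySem.Str.strip p = x := by
  induction ds generalizing acc with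
  | nil => simp
  | cons d ds ih =>
    simp only [List.foldl_cons, ih, pvInnerMem, List.mem_cons]
    constructor
    · rintro (⟨h | ⟨p, hp, he⟩⟩ | ⟨c, hc, hrest⟩)
      · exact Or.inl h
      · exact Or.inr ⟨d, Or.inl rfl, p, hp, he⟩
      · exact Or.inr ⟨c, Or.inr hc, hrest⟩
    · rintro (h | ⟨c, (rfl | hc), hrest⟩)
      · exact Or.inl (Or.inl h)
      · exact Or.inl (Or.inr hrest)
      · exact Or.inr ⟨c, hc, hrest⟩

-- `s <= {"NORM"} or s == set()` collapses to the subset test (∅ ⊆ anything)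
lemma pvSubOrEmpty (s t : PySem.Set String) :
    (s.issubset t || s.equal PySem.Set.empty) = s.issubset t := by
  cases h : s.equal PySem.Set.empty
  · rw [Bool.or_false]
  · rw [Bool.or_true]
    have hs : s.issubset t = true := by
      simp only [PySem.Set.equal, Bool.and_eq_true, PySem.Set.issubset, List.all_eq_true] at h ⊢
      intro x hx
      exact absurd (h.1 x hx) (by simp [PySem.Set.contains, PySem.Set.empty])
    rw [hs]

lemma pvAllDNorm_eq (rows : List (String × String)) :
    pvAllDNorm (PySem.Set.ofList (rows.map (fun r => r.1))) = rows.all (fun r => pvRowNorm r.1) := by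
  have hmem : ∀ x, x ∈ (PySem.Set.ofList (rows.map (fun r => r.1))).foldl
      (fun acc c => (pvSplitPlus c).foldl (fun a p => PySem.Set.add a (PySem.Str.strip p)) acc)
      PySem.Set.empty ↔ ∃ r ∈ rows, ∃ p ∈ pvSplitPlus r.1, PySem.Str.strip p = x := by
    intro x
    rw [pvMem_expand]
    simp only [PySem.Set.empty, List.not_mem_nil, false_or, PySem.Set.mem_ofList, List.mem_map]
    constructor
    · rintro ⟨d, ⟨r, hr, rfl⟩, hp⟩
      exact ⟨r, hr, hp⟩
    · rintro ⟨r, hr, hp⟩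
      exact ⟨r.1, ⟨r, hr, rfl⟩, hp⟩
  have hsub : PySem.Set.issubset
      ((PySem.Set.ofList (rows.map (fun r => r.1))).foldl
        (fun acc c => (pvSplitPlus c).foldl (fun a p => PySem.Set.add a (PySem.Str.strip p)) acc)
        PySem.Set.empty) (PySem.Set.ofList ["NORM"]) = rows.all (fun r => pvRowNorm r.1) := by
    rw [Bool.eq_iff_iff]
    simp only [PySem.Set.issubset, List.all_eq_true, PySem.Set.contains, List.contains_eq_mem,
      decide_eq_true_eq, pvRowNorm]
    constructor
    · intro h r hr
      simp only [beq_iff_eq]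
      intro p hp
      have := h _ ((hmem _).mpr ⟨r, hr, p, hp, rfl⟩)
      simpa [PySem.Set.mem_ofList] using this
    · intro h x hx
      obtain ⟨r, hr, p, hp, rfl⟩ := (hmem x).mp hx
      have := h r hr
      simp only [beq_iff_eq] at this
      simp [PySem.Set.mem_ofList, this p hp]
  unfold pvAllDNorm
  simp only [pvSubOrEmpty]
  exact hsub

lemma pvContains_ofList_map (rows : List (String × String)) (x : String) :
    (PySem.Set.ofList (rows.map (fun r => r.2))).contains x = rows.any (fun r => r.2 == x) := by
  rw [Bool.eq_iff_iff]
  simp only [PySem.Set.contains, List.contains_eq_mem, decide_eq_true_eq, PySem.Set.mem_ofList,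
    List.mem_map, List.any_eq_true, beq_iff_eq]

-- ===== VERDICT (by name: the statement is the Claim_ definition above) =====
theorem label_from_rows_py_spec : Claim_equal_label_from_rows_py := by
  intro rows _
  unfold Spec_label_from_rows_py label_from_rows_py label_from_rows_py_alt
  cases h : rows.isEmpty
  · simp only [Bool.false_eq_true, if_false]
    rw [pvLoopB_eq, pvAllDNorm_eq, pvContains_ofList_map, pvContains_ofList_map]
    rfl
  · rfl
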